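-- pv_equiv track=rewrite | github.com/moarseniy/idea | gradio_service/scripts/json_scripts/json_profile_generator.py | decide_type
-- ===== SOURCE A (Python) =====
-- from typing import Any, Dict, List, Optional, Sequence, Tuple, Set, Union
--
-- def decide_type(types_seen: Set[str]) -> str:
--     # Убираем "null" — влияет только на nullable
--     ts = {t for t in types_seen if t != "null"}
--     if not ts:
--         return "string"
--     if len(ts) == 1:
--         return next(iter(ts))
--     # Пробуем согласовать очевидные пары
--     if ts == {"int32", "int64"}:
--         return "int64"
--     if ts == {"int32", "float64"} or ts == {"int64", "float64"} or ts == {"int32", "int64", "float64"}: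
--         return "float64"
--     if ts == {"timestamp", "timestamp64(ms)"}:
--         return "timestamp64(ms)"
--     # Остальные смешанные случаи считаем неоднозначными → string
--     return "string"
-- ===== SOURCE B (Python) =====
-- # Pairwise lattice join: each pair of types unifies to their least upper bound
-- # ("string" = top, chains int32<int64<float64 and timestamp<timestamp64(ms)),
-- # and the whole set is reduced by folding that binary join.
-- _RANK = {"int32": ("num", 1), "int64": ("num", 2), "float64": ("num", 3),
--          "timestamp": ("ts", 1), "timestamp64(ms)": ("ts", 2)}
--
-- def _join(a, b):
--     if a == b:
--         return a
--     ra, rb = _RANK.get(a), _RANK.get(b)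
--     if ra and rb and ra[0] == rb[0]:
--         return a if ra[1] >= rb[1] else b
--     return "string"
--
-- def decide_type(types_seen):
--     ts = {t for t in types_seen if t != "null"}
--     if not ts:
--         return "string"
--     it = iter(ts)
--     acc = next(it)
--     for t in it:
--         acc = _join(acc, t)
--     return acc
-- ===== Notes on version B (the rewrite author's own statement) =====
-- stated objective: alternative
-- what changed: Replaced A's enumerated set-equality checks (including the len==1 short-circuit) by a binary least-upper-bound join on the type lattice (string = top, two widening chains) folded pairwise over the set.
import Mathlib
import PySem

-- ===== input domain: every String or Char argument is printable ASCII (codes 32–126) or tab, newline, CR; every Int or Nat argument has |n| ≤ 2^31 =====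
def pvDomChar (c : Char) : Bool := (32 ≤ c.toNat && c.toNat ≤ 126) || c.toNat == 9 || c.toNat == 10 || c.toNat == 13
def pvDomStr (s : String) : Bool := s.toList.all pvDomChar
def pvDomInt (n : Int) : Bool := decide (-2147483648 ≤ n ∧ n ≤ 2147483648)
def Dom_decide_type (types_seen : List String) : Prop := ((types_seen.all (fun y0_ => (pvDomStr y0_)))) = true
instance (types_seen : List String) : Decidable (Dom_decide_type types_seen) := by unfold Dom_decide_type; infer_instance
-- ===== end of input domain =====

-- B replaces A's enumerated set-equality case chain by a binary least-upper-bound join on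
-- the type lattice ("string" = top, chains int32<int64<float64, timestamp<timestamp64(ms))
-- folded pairwise over the set (objective: alternative algorithm, same cost).

-- ===== PORT A =====
def decide_type (types_seen : List String) : String :=
  let ts : PySem.Set String := PySem.Set.ofList (types_seen.filter (fun t => t != "null"))
  if ts.isEmpty then "string"
  else if PySem.Set.len ts == 1 then ts.headD ""
  else if PySem.Set.equal ts (PySem.Set.ofList ["int32", "int64"]) then "int64"
  else if PySem.Set.equal ts (PySem.Set.ofList ["int32", "float64"])
       || PySem.Set.equal ts (PySem.Set.ofList ["int64", "float64"])
       || PySem.Set.equal ts (PySem.Set.ofList ["int32", "int64", "float64"]) then "float64"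
  else if PySem.Set.equal ts (PySem.Set.ofList ["timestamp", "timestamp64(ms)"]) then "timestamp64(ms)"
  else "string"

-- ===== PORT B =====
-- _RANK: group tag and widening rank of the known types
def pvRank (t : String) : Option (String × Nat) :=
  if t == "int32" then some ("num", 1)
  else if t == "int64" then some ("num", 2)
  else if t == "float64" then some ("num", 3)
  else if t == "timestamp" then some ("ts", 1)
  else if t == "timestamp64(ms)" then some ("ts", 2)
  else none

-- _join: least upper bound of two type names
def pvJoin (a b : String) : String :=
  if a == b then a
  else match pvRank a, pvRank b with
       | some (ga, ra), some (gb, rb) =>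
         if ga == gb then (if rb ≤ ra then a else b) else "string"
       | _, _ => "string"

-- the set's elements are consumed by an order-insensitive fold (pvJoin is comm./assoc.)
def decide_type_alt (types_seen : List String) : String :=
  let ts : PySem.Set String := PySem.Set.ofList (types_seen.filter (fun t => t != "null"))
  match ts with
  | [] => "string"
  | acc :: rest => rest.foldl pvJoin acc

-- ===== PRECONDITION & SPEC =====
def Spec_decide_type (types_seen : List String) (out : String) : Prop := out = decide_type_alt types_seen
instance (types_seen : List String) (out : String) : Decidable (Spec_decide_type types_seen out) := by unfold Spec_decide_type; infer_instance

-- ===== CLAIM (what is proved, stated in full; the proofs are below) =====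
def Claim_equal_decide_type : Prop := ∀ (types_seen : List String), Dom_decide_type types_seen → Spec_decide_type types_seen (decide_type types_seen)

-- ===== LEMMAS AND PROOFS =====

def pvRk (x : String) : Nat := ((pvRank x).getD ("", 0)).2

-- "string" absorbs the fold
lemma pv_fold_string (t : List String) : t.foldl pvJoin "string" = "string" := by
  induction t with
  | nil => rfl
  | cons x t ih =>
    have hx : pvJoin "string" x = "string" := by
      by_cases h : x = "string"
      · simp [pvJoin, h]
      · have : ("string" == x) = false := by
          simp only [beq_eq_false_iff_ne, ne_eq]
          exact fun hc => h hc.symm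
        simp [pvJoin, this, pvRank]
    simp [List.foldl, hx, ih]

lemma pv_rank_groups (x : String) (g : String) (k : Nat)
    (h : pvRank x = some (g, k)) : g = "num" ∨ g = "ts" := by
  unfold pvRank at h
  split_ifs at h <;> simp_all

-- join of two same-group elements is one of them, with the larger rank
lemma pv_join_group (g : String) (a b : String) (ra rb : Nat)
    (ha : pvRank a = some (g, ra)) (hb : pvRank b = some (g, rb)) :
    (pvJoin a b = a ∨ pvJoin a b = b) ∧ pvRk a ≤ pvRk (pvJoin a b) ∧ pvRk b ≤ pvRk (pvJoin a b) := by
  by_cases hab : a = b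
  · subst hab; simp [pvJoin]
  · have hab' : (a == b) = false := by simp [hab]
    simp only [pvJoin, hab', Bool.false_eq_true, if_false, ha, hb, beq_self_eq_true, if_true]
    by_cases hle : rb ≤ ra
    · simp [hle, pvRk, ha, hb]
    · simp [hle, pvRk, ha, hb]; omega

-- folding within one group returns a member of maximal rank
lemma pv_fold_group (g : String) (acc : String) (t : List String)
    (hacc : ∃ r, pvRank acc = some (g, r))
    (ht : ∀ x ∈ t, ∃ r, pvRank x = some (g, r)) :
    t.foldl pvJoin acc ∈ acc :: t ∧ ∀ x ∈ acc :: t, pvRk x ≤ pvRk (t.foldl pvJoin acc) := by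
  induction t generalizing acc with
  | nil => simp
  | cons b t ih =>
    obtain ⟨ra, ha⟩ := hacc
    obtain ⟨rb, hb⟩ := ht b (by simp)
    obtain ⟨hmem, hr1, hr2⟩ := pv_join_group g acc b ra rb ha hb
    have hacc' : ∃ r, pvRank (pvJoin acc b) = some (g, r) := by
      rcases hmem with h | h <;> rw [h] <;> exact ⟨_, by assumption⟩
    obtain ⟨ihm, ihr⟩ := ih (pvJoin acc b) hacc' (fun x hx => ht x (by simp [hx]))
    have hfold : (b :: t).foldl pvJoin acc = t.foldl pvJoin (pvJoin acc b) := rfl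
    constructor
    · rw [hfold]
      rcases List.mem_cons.mp ihm with h' | h'
      · rw [h']
        rcases hmem with h'' | h'' <;> rw [h''] <;> simp
      · exact List.mem_cons_of_mem _ (List.mem_cons_of_mem _ h')
    · intro x hx
      rw [hfold]
      have hj : pvRk (pvJoin acc b) ≤ pvRk (t.foldl pvJoin (pvJoin acc b)) :=
        ihr _ (by simp)
      rcases List.mem_cons.mp hx with h | h
      · rw [h]; omega
      rcases List.mem_cons.mp h with h' | h'
      · rw [h']; omega
      · exact ihr x (List.mem_cons_of_mem _ h')

-- if the fold does not reach "string", every element equals the result or shares its group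
lemma pv_fold_nonstring (acc : String) (t : List String)
    (h : t.foldl pvJoin acc ≠ "string") :
    t.foldl pvJoin acc ∈ acc :: t ∧
    ∀ x ∈ acc :: t, x = t.foldl pvJoin acc ∨
      ((pvRank x).map Prod.fst = (pvRank (t.foldl pvJoin acc)).map Prod.fst ∧ pvRank x ≠ none) := by
  induction t generalizing acc with
  | nil => simp
  | cons b t ih =>
    have hfold : (b :: t).foldl pvJoin acc = t.foldl pvJoin (pvJoin acc b) := rfl
    rw [hfold] at h ⊢
    have hjoin : pvJoin acc b ≠ "string" := by
      intro hc
      rw [hc, pv_fold_string] at h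
      exact h rfl
    obtain ⟨ihm, ihp⟩ := ih (pvJoin acc b) h
    have hjr := ihp (pvJoin acc b) (by simp)
    set r := t.foldl pvJoin (pvJoin acc b) with hrdef
    by_cases hab : acc = b
    · have hj : pvJoin acc b = acc := by simp [pvJoin, hab]
      rw [hj] at ihm hjr
      constructor
      · rcases List.mem_cons.mp ihm with h' | h'
        · rw [h']; simp
        · exact List.mem_cons_of_mem _ (List.mem_cons_of_mem _ h')
      · intro x hx
        rcases List.mem_cons.mp hx with h' | h'
        · rw [h']; exact hjr
        rcases List.mem_cons.mp h' with h'' | h''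
        · rw [h'', ← hab]; exact hjr
        · exact ihp x (List.mem_cons_of_mem _ h'')
    · have hab' : (acc == b) = false := by simp [hab]
      -- pvJoin acc b ≠ "string" and acc ≠ b forces both ranked in the same group
      obtain ⟨ga, ra, ha, rb, hb⟩ :
          ∃ ga ra, pvRank acc = some (ga, ra) ∧ ∃ rb, pvRank b = some (ga, rb) := by
        unfold pvJoin at hjoin
        rw [hab'] at hjoin
        simp only [Bool.false_eq_true, if_false] at hjoin
        rcases hA : pvRank acc with _ | ⟨ga, ra⟩ <;> rcases hB : pvRank b with _ | ⟨gb, rb⟩ <;>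
          rw [hA, hB] at hjoin <;> simp at hjoin
        by_cases hg : ga = gb
        · exact ⟨ga, ra, rfl, rb, by rw [hg]⟩
        · simp [hg] at hjoin
      obtain ⟨hm, _, _⟩ := pv_join_group ga acc b ra rb ha hb
      -- group of the join and of the final result
      have hjg : (pvRank (pvJoin acc b)).map Prod.fst = some ga := by
        rcases hm with h' | h' <;> rw [h'] <;> simp [ha, hb]
      have hres : (pvRank r).map Prod.fst = some ga := by
        rcases hjr with h' | h'
        · rw [← h']; exact hjg
        · rw [← h'.1]; exact hjg
      constructor
      · rcases List.mem_cons.mp ihm with h' | h'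
        · rw [h']
          rcases hm with h'' | h'' <;> rw [h''] <;> simp
        · exact List.mem_cons_of_mem _ (List.mem_cons_of_mem _ h')
      · intro x hx
        rcases List.mem_cons.mp hx with h' | h'
        · rw [h']; right
          exact ⟨by rw [hres]; simp [ha], by simp [ha]⟩
        rcases List.mem_cons.mp h' with h'' | h''
        · rw [h'']; right
          exact ⟨by rw [hres]; simp [hb], by simp [hb]⟩
        · exact ihp x (List.mem_cons_of_mem _ h'')

-- membership bridges between the group lists and pvRank
lemma pv_num_rank (x : String) (h : x = "int32" ∨ x = "int64" ∨ x = "float64") :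
    ∃ r, pvRank x = some ("num", r) := by
  rcases h with h | h | h <;> subst h <;> exact ⟨_, rfl⟩

lemma pv_ts_rank (x : String) (h : x = "timestamp" ∨ x = "timestamp64(ms)") :
    ∃ r, pvRank x = some ("ts", r) := by
  rcases h with h | h <;> subst h <;> exact ⟨_, rfl⟩

lemma pv_rank_num_cases (x : String) (r : Nat) (h : pvRank x = some ("num", r)) :
    x = "int32" ∨ x = "int64" ∨ x = "float64" := by
  unfold pvRank at h; split_ifs at h <;> simp_all

lemma pv_rank_ts_cases (x : String) (r : Nat) (h : pvRank x = some ("ts", r)) :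
    x = "timestamp" ∨ x = "timestamp64(ms)" := by
  unfold pvRank at h; split_ifs at h <;> simp_all

-- a nodup list all of whose elements equal `a` has at most one element
lemma pv_len_le_one (l : List String) (hnd : l.Nodup) (a : String)
    (h : ∀ x ∈ l, x = a) : l.length ≤ 1 := by
  match l with
  | [] => simp
  | [_] => simp
  | x :: y :: r =>
    exfalso
    have hx := h x (by simp)
    have hy := h y (by simp)
    have hne : x ∉ y :: r := (List.nodup_cons.mp hnd).1
    exact hne (by simp [hx, hy])

lemma pv_equal_true (l target : List String) (h : ∀ x, x ∈ l ↔ x ∈ target) :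
    PySem.Set.equal l target = true := (PySem.Set.equal_iff l target).mpr h

lemma pv_equal_false (l target : List String)
    (h : ¬ (∀ x, x ∈ l ↔ x ∈ target)) : PySem.Set.equal l target = false := by
  rw [Bool.eq_false_iff]
  intro hc
  exact h ((PySem.Set.equal_iff l target).mp hc)

-- all-numeric, length ≥ 2: the fold returns the widest numeric type present
lemma pv_fold_num (acc : String) (t : List String)
    (hall : ∀ x ∈ acc :: t, x = "int32" ∨ x = "int64" ∨ x = "float64") :
    t.foldl pvJoin acc =
      (if "float64" ∈ acc :: t then "float64"
       else if "int64" ∈ acc :: t then "int64" else "int32") := by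
  obtain ⟨hmem, hmax⟩ := pv_fold_group "num" acc t
    (pv_num_rank acc (hall acc (by simp)))
    (fun x hx => pv_num_rank x (hall x (by simp [hx])))
  set r := t.foldl pvJoin acc with hr
  obtain ⟨k, hk⟩ := pv_num_rank r (hall r hmem)
  by_cases hf : "float64" ∈ acc :: t
  · rw [if_pos hf]
    have h3 : pvRk "float64" ≤ pvRk r := hmax _ hf
    rcases pv_rank_num_cases r k hk with h | h | h
    · rw [h] at h3; exact absurd h3 (by decide)
    · rw [h] at h3; exact absurd h3 (by decide)
    · exact h
  · rw [if_neg hf]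
    by_cases h64 : "int64" ∈ acc :: t
    · rw [if_pos h64]
      have h2 : pvRk "int64" ≤ pvRk r := hmax _ h64
      rcases pv_rank_num_cases r k hk with h | h | h
      · rw [h] at h2; exact absurd h2 (by decide)
      · exact h
      · exact absurd (h ▸ hmem) hf
    · rw [if_neg h64]
      rcases pv_rank_num_cases r k hk with h | h | h
      · exact h
      · exact absurd (h ▸ hmem) h64
      · exact absurd (h ▸ hmem) hf

-- all-timestamp with both present: the fold returns timestamp64(ms)
lemma pv_fold_ts (acc : String) (t : List String)
    (hall : ∀ x ∈ acc :: t, x = "timestamp" ∨ x = "timestamp64(ms)")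
    (h64 : "timestamp64(ms)" ∈ acc :: t) :
    t.foldl pvJoin acc = "timestamp64(ms)" := by
  obtain ⟨hmem, hmax⟩ := pv_fold_group "ts" acc t
    (pv_ts_rank acc (hall acc (by simp)))
    (fun x hx => pv_ts_rank x (hall x (by simp [hx])))
  set r := t.foldl pvJoin acc with hr
  obtain ⟨k, hk⟩ := pv_ts_rank r (hall r hmem)
  have h2 : pvRk "timestamp64(ms)" ≤ pvRk r := hmax _ h64
  rcases pv_rank_ts_cases r k hk with h | h
  · rw [h] at h2; exact absurd h2 (by decide)
  · exact h

-- mixed groups (nodup, length ≥ 2, neither all-numeric nor all-timestamp): fold = "string"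
lemma pv_fold_mixed (acc : String) (t : List String)
    (hnd : (acc :: t).Nodup) (hlen : 2 ≤ (acc :: t).length)
    (hN : ¬ ∀ x ∈ acc :: t, x = "int32" ∨ x = "int64" ∨ x = "float64")
    (hT : ¬ ∀ x ∈ acc :: t, x = "timestamp" ∨ x = "timestamp64(ms)") :
    t.foldl pvJoin acc = "string" := by
  by_contra hs
  obtain ⟨hmem, hprop⟩ := pv_fold_nonstring acc t hs
  set r := t.foldl pvJoin acc with hr
  rcases hR : pvRank r with _ | ⟨g, k⟩
  · -- no rank: every element must equal r, contradicting nodup ∧ length ≥ 2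
    have hall : ∀ x ∈ acc :: t, x = r := by
      intro x hx
      rcases hprop x hx with h | h
      · exact h
      · rw [hR] at h; simp at h
    have := pv_len_le_one (acc :: t) hnd r hall
    simp only [List.length_cons] at this hlen
    omega
  · rcases pv_rank_groups r g k hR with hg | hg <;> subst hg
    · apply hN
      intro x hx
      rcases hprop x hx with h | h
      · exact h ▸ pv_rank_num_cases r k hR
      · rw [hR] at h
        rcases hX : pvRank x with _ | ⟨gx, kx⟩
        · exact absurd hX h.2
        · rw [hX] at h; simp at h
          exact pv_rank_num_cases x kx (h ▸ hX)
    · apply hT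
      intro x hx
      rcases hprop x hx with h | h
      · exact h ▸ pv_rank_ts_cases r k hR
      · rw [hR] at h
        rcases hX : pvRank x with _ | ⟨gx, kx⟩
        · exact absurd hX h.2
        · rw [hX] at h; simp at h
          exact pv_rank_ts_cases x kx (h ▸ hX)

-- the tail of both programs agrees on any nodup element list of length ≥ 2
lemma pv_tail (acc : String) (t : List String)
    (hnd : (acc :: t).Nodup) (hlen : 2 ≤ (acc :: t).length) :
    (if PySem.Set.equal (acc :: t) (PySem.Set.ofList ["int32", "int64"]) then "int64"
     else if PySem.Set.equal (acc :: t) (PySem.Set.ofList ["int32", "float64"])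
          || PySem.Set.equal (acc :: t) (PySem.Set.ofList ["int64", "float64"])
          || PySem.Set.equal (acc :: t) (PySem.Set.ofList ["int32", "int64", "float64"]) then "float64"
     else if PySem.Set.equal (acc :: t) (PySem.Set.ofList ["timestamp", "timestamp64(ms)"]) then "timestamp64(ms)"
     else "string")
    = t.foldl pvJoin acc := by
  have e1 : PySem.Set.ofList ["int32", "int64"] = ["int32", "int64"] := by rfl
  have e2 : PySem.Set.ofList ["int32", "float64"] = ["int32", "float64"] := by rfl
  have e3 : PySem.Set.ofList ["int64", "float64"] = ["int64", "float64"] := by rfl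
  have e4 : PySem.Set.ofList ["int32", "int64", "float64"] = ["int32", "int64", "float64"] := by rfl
  have e5 : PySem.Set.ofList ["timestamp", "timestamp64(ms)"] = ["timestamp", "timestamp64(ms)"] := by rfl
  rw [e1, e2, e3, e4, e5]
  by_cases hN : ∀ x ∈ (acc :: t), x = "int32" ∨ x = "int64" ∨ x = "float64"
  · -- all numeric
    rw [pv_fold_num acc t hN]
    by_cases hf : "float64" ∈ (acc :: t)
    · have hA1 : PySem.Set.equal (acc :: t) ["int32", "int64"] = false := by
        apply pv_equal_false; intro h
        have := (h "float64").mp hf; simp at this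
      by_cases h32 : "int32" ∈ (acc :: t) <;> by_cases h64 : "int64" ∈ (acc :: t)
      · have hA2 : PySem.Set.equal (acc :: t) ["int32", "int64", "float64"] = true := by
          apply pv_equal_true; intro x
          constructor
          · intro hx; rcases hN x hx with h | h | h <;> simp [h]
          · intro hx; simp at hx; rcases hx with h | h | h <;> subst h <;> assumption
        simp [hA1, hA2, hf]
      · have hA2 : PySem.Set.equal (acc :: t) ["int32", "float64"] = true := by
          apply pv_equal_true; intro x
          constructor
          · intro hx
            rcases hN x hx with h | h | h
            · simp [h]
            · exact absurd (h ▸ hx) h64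
            · simp [h]
          · intro hx; simp at hx; rcases hx with h | h <;> subst h <;> assumption
        simp [hA1, hA2, hf]
      · have hA2 : PySem.Set.equal (acc :: t) ["int64", "float64"] = true := by
          apply pv_equal_true; intro x
          constructor
          · intro hx
            rcases hN x hx with h | h | h
            · exact absurd (h ▸ hx) h32
            · simp [h]
            · simp [h]
          · intro hx; simp at hx; rcases hx with h | h <;> subst h <;> assumption
        simp [hA1, hA2, hf]
      · exfalso
        have : (acc :: t).length ≤ 1 := by
          apply pv_len_le_one (acc :: t) hnd "float64"
          intro x hx
          rcases hN x hx with h | h | h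
          · exact absurd (h ▸ hx) h32
          · exact absurd (h ▸ hx) h64
          · exact h
        omega
    · -- no float64: both int32 and int64 present
      have h32 : "int32" ∈ (acc :: t) := by
        by_contra h32
        have : (acc :: t).length ≤ 1 := by
          apply pv_len_le_one (acc :: t) hnd "int64"
          intro x hx
          rcases hN x hx with h | h | h
          · exact absurd (h ▸ hx) h32
          · exact h
          · exact absurd (h ▸ hx) hf
        omega
      have h64 : "int64" ∈ (acc :: t) := by
        by_contra h64
        have : (acc :: t).length ≤ 1 := by
          apply pv_len_le_one (acc :: t) hnd "int32"
          intro x hx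
          rcases hN x hx with h | h | h
          · exact h
          · exact absurd (h ▸ hx) h64
          · exact absurd (h ▸ hx) hf
        omega
      have hA1 : PySem.Set.equal (acc :: t) ["int32", "int64"] = true := by
        apply pv_equal_true; intro x
        constructor
        · intro hx
          rcases hN x hx with h | h | h
          · simp [h]
          · simp [h]
          · exact absurd (h ▸ hx) hf
        · intro hx; simp at hx; rcases hx with h | h <;> subst h <;> assumption
      simp [hA1, hf, h64]
  · -- not all numeric
    have hA1 : PySem.Set.equal (acc :: t) ["int32", "int64"] = false := by
      apply pv_equal_false; intro h
      apply hN; intro x hx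
      have := (h x).mp hx; simp at this
      rcases this with h' | h' <;> simp [h']
    have hA2 : PySem.Set.equal (acc :: t) ["int32", "float64"] = false := by
      apply pv_equal_false; intro h
      apply hN; intro x hx
      have := (h x).mp hx; simp at this
      rcases this with h' | h' <;> simp [h']
    have hA3 : PySem.Set.equal (acc :: t) ["int64", "float64"] = false := by
      apply pv_equal_false; intro h
      apply hN; intro x hx
      have := (h x).mp hx; simp at this
      rcases this with h' | h' <;> simp [h']
    have hA4 : PySem.Set.equal (acc :: t) ["int32", "int64", "float64"] = false := by
      apply pv_equal_false; intro h
      apply hN; intro x hx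
      have := (h x).mp hx; simp at this
      rcases this with h' | h' | h' <;> simp [h']
    by_cases hT : ∀ x ∈ (acc :: t), x = "timestamp" ∨ x = "timestamp64(ms)"
    · -- all timestamps; both members must be present
      have hts : "timestamp" ∈ (acc :: t) := by
        by_contra hts
        have : (acc :: t).length ≤ 1 := by
          apply pv_len_le_one (acc :: t) hnd "timestamp64(ms)"
          intro x hx
          rcases hT x hx with h | h
          · exact absurd (h ▸ hx) hts
          · exact h
        omega
      have hts64 : "timestamp64(ms)" ∈ (acc :: t) := by
        by_contra hts64
        have : (acc :: t).length ≤ 1 := by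
          apply pv_len_le_one (acc :: t) hnd "timestamp"
          intro x hx
          rcases hT x hx with h | h
          · exact h
          · exact absurd (h ▸ hx) hts64
        omega
      have hA5 : PySem.Set.equal (acc :: t) ["timestamp", "timestamp64(ms)"] = true := by
        apply pv_equal_true; intro x
        constructor
        · intro hx; rcases hT x hx with h | h <;> simp [h]
        · intro hx; simp at hx; rcases hx with h | h <;> subst h <;> assumption
      rw [pv_fold_ts acc t hT hts64]
      simp [hA1, hA2, hA3, hA4, hA5]
    · -- mixed / unknown: both sides give "string"
      have hA5 : PySem.Set.equal (acc :: t) ["timestamp", "timestamp64(ms)"] = false := by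
        apply pv_equal_false; intro h
        apply hT; intro x hx
        have := (h x).mp hx; simp at this
        rcases this with h' | h' <;> simp [h']
      rw [pv_fold_mixed acc t hnd hlen hN hT]
      simp [hA1, hA2, hA3, hA4, hA5]

-- ===== VERDICT (by name: the statement is the Claim_ definition above) =====
theorem decide_type_spec : Claim_equal_decide_type := by
  intro types_seen _
  unfold Spec_decide_type decide_type decide_type_alt
  set l : PySem.Set String :=
    PySem.Set.ofList (types_seen.filter (fun t => t != "null")) with hl
  have hnd : List.Nodup l := PySem.Set.nodup_ofList _
  match hml : l with
  | [] => simp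
  | acc :: rest =>
    have he : ((acc :: rest : List String).isEmpty) = false := by simp
    simp only [he, Bool.false_eq_true, if_false]
    by_cases h1 : rest = []
    · subst h1
      have hb : (PySem.Set.len [acc] == 1) = true := by
        simp only [PySem.Set.len, List.length_cons, List.length_nil]
        rfl
      simp [hb]
    · have hlen : 2 ≤ (acc :: rest).length := by
        have := List.length_pos_of_ne_nil h1
        simp; omega
      have hb : (PySem.Set.len (acc :: rest) == 1) = false := by
        simp only [PySem.Set.len, beq_eq_false_iff_ne, ne_eq, List.length_cons]
        intro hc
        have : rest.length = 0 := by omega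
        exact h1 (List.eq_nil_of_length_eq_zero this)
      simp only [hb, Bool.false_eq_true, if_false]
      exact pv_tail acc rest (hml ▸ hnd) hlen
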